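-- pv_equiv track=rewrite | github.com/sourcegraph/src-cli | docker/campaign-volume-workspace/push.py | calculate_tags
-- ===== SOURCE A (Python) =====
-- import itertools
-- from typing import BinaryIO, Optional, Sequence
--
-- def calculate_tags(ref: str) -> Sequence[str]:
--     # The tags always include latest.
--     tags = ["latest"]
--
--     # If the ref is a tag ref, then we should parse the version out.
--     if ref.startswith("refs/tags/"):
--         tags.extend(
--             [
--                 ".".join(vc)
--                 for vc in itertools.accumulate(
--                     ref.split("/", 2)[2].split("."),
--                     lambda vlist, v: vlist + [v],
--                     initial=[],
--                 )
--                 if len(vc) > 0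
--             ]
--         )
--
--     return tags
-- ===== SOURCE B (Python) =====
-- def calculate_tags(ref):
--     # The tags always include latest.
--     tags = ["latest"]
--
--     # If the ref is a tag ref, parse the version and emit every dot-prefix
--     # by scanning the string itself (no itertools, no list-of-lists).
--     if ref.startswith("refs/tags/"):
--         version = ref.split("/", 2)[2]
--         for i, ch in enumerate(version):
--             if ch == ".":
--                 tags.append(version[:i])
--         tags.append(version)
--
--     return tags
-- ===== Notes on version B (the rewrite author's own statement) =====
-- stated objective: simpler
-- what changed: B drops itertools.accumulate and the component list-of-lists entirely: it scans the version string once, emitting version[:i] at each dot position and the full version at the end.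
import Mathlib
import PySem

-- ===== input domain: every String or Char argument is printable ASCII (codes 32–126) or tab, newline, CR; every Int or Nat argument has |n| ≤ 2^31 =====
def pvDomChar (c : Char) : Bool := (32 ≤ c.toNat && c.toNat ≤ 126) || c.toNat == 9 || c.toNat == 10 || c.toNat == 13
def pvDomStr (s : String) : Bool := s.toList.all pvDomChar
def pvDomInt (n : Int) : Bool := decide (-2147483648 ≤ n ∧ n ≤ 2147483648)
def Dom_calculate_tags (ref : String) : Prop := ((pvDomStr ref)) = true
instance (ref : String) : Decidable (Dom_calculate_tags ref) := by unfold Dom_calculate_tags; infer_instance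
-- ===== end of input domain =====

-- B replaces itertools.accumulate + list-of-lists + join with a single scan of the
-- version string that emits version[:i] at each dot (objective: simpler).

-- ===== PORT A =====
def calculate_tags (ref : String) : List String :=
  let tags := ["latest"]
  if PySem.Str.startswith ref "refs/tags/" then
    -- ref.split("/", 2)[2]: under the guard the ref contains two '/', so index 2 is
    -- always in range and the .getD defaults are unreachable
    let version := (PySem.List.pyGet? ((PySem.Str.splitMax? ref "/" 2).getD []) 2).getD ""
    -- version.split("."): sep is nonempty, so split? is always some
    let comps := (PySem.Str.split? version ".").getD []
    -- itertools.accumulate(comps, lambda vlist, v: vlist + [v], initial=[]):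
    -- fold carrying (emitted list of lists so far, current accumulated list)
    let accs := (comps.foldl
        (fun (st : List (List String) × List String) v =>
          (st.1 ++ [st.2 ++ [v]], st.2 ++ [v]))
        ([([] : List String)], [])).1
    tags ++ (accs.filter (fun vc => decide (0 < vc.length))).map
        (fun vc => PySem.Str.join "." vc)
  else tags

-- ===== PORT B =====
-- the 'for i, ch in enumerate(version)' loop, carrying the index i and the tags list;
-- version[:i] with 0 ≤ i is exactly List.take i
def pvScanDots (full : List Char) (cs : List Char) (i : Nat) (tags : List String) : List String :=
  match cs with
  | [] => tags
  | c :: rest =>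
      pvScanDots full rest (i + 1)
        (if c = '.' then tags ++ [String.ofList (full.take i)] else tags)

def calculate_tags_alt (ref : String) : List String :=
  let tags := ["latest"]
  if PySem.Str.startswith ref "refs/tags/" then
    let version := (PySem.List.pyGet? ((PySem.Str.splitMax? ref "/" 2).getD []) 2).getD ""
    pvScanDots version.toList version.toList 0 tags ++ [version]
  else tags

-- ===== PRECONDITION & SPEC =====
def Spec_calculate_tags (ref : String) (out : List String) : Prop := out = calculate_tags_alt ref
instance (ref : String) (out : List String) : Decidable (Spec_calculate_tags ref out) := by unfold Spec_calculate_tags; infer_instance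

-- ===== CLAIM (what is proved, stated in full; the proofs are below) =====
def Claim_equal_calculate_tags : Prop := ∀ (ref : String), Dom_calculate_tags ref → Spec_calculate_tags ref (calculate_tags ref)

-- ===== LEMMAS AND PROOFS =====

def pvSplit1 (cs : List Char) : List (List Char) :=
  match cs with
  | [] => [[]]
  | c :: rest =>
      if c = '.' then [] :: pvSplit1 rest
      else match pvSplit1 rest with
           | [] => [[c]]
           | h :: t => (c :: h) :: t

theorem pvSplit1_ne_nil (cs : List Char) : pvSplit1 cs ≠ [] := by
  cases cs with
  | nil => simp [pvSplit1]
  | cons c rest =>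
      simp only [pvSplit1]
      split
      · simp
      · split <;> simp

theorem pv_go_spec (fuel : Nat) (l cur : List Char) (acc : List (List Char))
    (h : l.length ≤ fuel) :
    PySem.Chars.splitOn.go ['.'] fuel l cur acc =
      acc.reverse ++ (match pvSplit1 l with
                      | [] => [cur.reverse]
                      | h :: t => (cur.reverse ++ h) :: t) := by
  induction fuel generalizing l cur acc with
  | zero =>
      have : l = [] := by cases l <;> simp_all
      subst this
      simp [PySem.Chars.splitOn.go, pvSplit1]
  | succ f ih =>
      cases l with
      | nil => simp [PySem.Chars.splitOn.go, pvSplit1]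
      | cons c rest =>
          simp only [PySem.Chars.splitOn.go]
          by_cases hc : c = '.'
          · subst hc
            have hp : (['.'] : List Char).isPrefixOf ('.' :: rest) = true := by
              simp [List.isPrefixOf]
            rw [if_pos hp]
            simp only [List.length_cons] at h
            simp only [List.length_singleton, List.drop_succ_cons, List.drop_zero]
            rw [ih rest [] (cur.reverse :: acc) (by omega)]
            rcases hs : pvSplit1 rest with _ | ⟨hh, t⟩
            · exact absurd hs (pvSplit1_ne_nil rest)
            · simp [pvSplit1, hs]
          · have hp : (['.'] : List Char).isPrefixOf (c :: rest) = false := by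
              simp [List.isPrefixOf]; exact fun hh => absurd hh.symm hc
            rw [if_neg (by simp [hp])]
            simp only [List.length_cons] at h
            rw [ih rest (c :: cur) acc (by omega)]
            rcases hs : pvSplit1 rest with _ | ⟨hh, t⟩
            · exact absurd hs (pvSplit1_ne_nil rest)
            · simp [pvSplit1, hs, hc]

theorem pv_splitOn_eq (cs : List Char) : PySem.Chars.splitOn cs ['.'] = pvSplit1 cs := by
  have := pv_go_spec (cs.length + 1) cs [] [] (by omega)
  rcases hs : pvSplit1 cs with _ | ⟨h, t⟩
  · exact absurd hs (pvSplit1_ne_nil cs)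
  · simpa [PySem.Chars.splitOn, hs] using this

def pvE (cs : List Char) : List (List Char) :=
  match cs with
  | [] => [[]]
  | c :: rest =>
      if c = '.' then [] :: (pvE rest).map (fun t => '.' :: t)
      else (pvE rest).map (fun t => c :: t)

def pvPrefixes {α : Type} (cur : List α) : List α → List (List α)
  | [] => []
  | v :: vs => (cur ++ [v]) :: pvPrefixes (cur ++ [v]) vs

def pvJ (cur : List Char) : List (List Char) → List (List Char)
  | [] => []
  | v :: vs => (cur ++ v) :: pvJ (cur ++ v ++ ['.']) vs

theorem pv_fold_spec {α : Type} (comps : List α) (accl : List (List α)) (cur : List α) :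
    (comps.foldl (fun (st : List (List α) × List α) v =>
        (st.1 ++ [st.2 ++ [v]], st.2 ++ [v])) (accl, cur)) =
      (accl ++ pvPrefixes cur comps, cur ++ comps) := by
  induction comps generalizing accl cur with
  | nil => simp [pvPrefixes]
  | cons v vs ih => simp [pvPrefixes, ih]

theorem pv_prefixes_ne_nil {α : Type} (comps : List α) (cur : List α) :
    ∀ x ∈ pvPrefixes cur comps, x ≠ [] := by
  induction comps generalizing cur with
  | nil => simp [pvPrefixes]
  | cons v vs ih =>
      intro x hx
      simp only [pvPrefixes, List.mem_cons] at hx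
      rcases hx with h | h
      · subst h; simp
      · exact ih _ x h

theorem pv_prefixes_map {α β : Type} (f : α → β) (comps : List α) (cur : List α) :
    pvPrefixes (cur.map f) (comps.map f) = (pvPrefixes cur comps).map (List.map f) := by
  induction comps generalizing cur with
  | nil => simp [pvPrefixes]
  | cons v vs ih => simp [pvPrefixes, ← ih]

theorem pv_join_snoc (xs : List (List Char)) (v : List Char) :
    PySem.Chars.join ['.'] (xs ++ [v]) =
      (match xs with
       | [] => v
       | _ :: _ => PySem.Chars.join ['.'] xs ++ ['.'] ++ v) := by
  induction xs with
  | nil => simp [PySem.Chars.join_singleton]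
  | cons x xs ih =>
      cases xs with
      | nil => simp [PySem.Chars.join_cons_cons, PySem.Chars.join_singleton]
      | cons y ys =>
          simp only [List.cons_append, PySem.Chars.join_cons_cons]
          rw [List.cons_append] at ih
          simp [ih]

theorem pv_map_join_prefixes (comps : List (List Char)) (cur : List (List Char)) (hcur : cur ≠ []) :
    (pvPrefixes cur comps).map (PySem.Chars.join ['.']) =
      pvJ (PySem.Chars.join ['.'] cur ++ ['.']) comps := by
  induction comps generalizing cur with
  | nil => simp [pvPrefixes, pvJ]
  | cons v vs ih =>
      simp only [pvPrefixes, List.map_cons, pvJ]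
      have hj : PySem.Chars.join ['.'] (cur ++ [v]) = PySem.Chars.join ['.'] cur ++ ['.'] ++ v := by
        rw [pv_join_snoc]
        cases cur with
        | nil => exact absurd rfl hcur
        | cons c cs => simp
      rw [hj, ih _ (by simp), hj]

theorem pv_map_join_prefixes_nil (comps : List (List Char)) :
    (pvPrefixes ([] : List (List Char)) comps).map (PySem.Chars.join ['.']) = pvJ [] comps := by
  cases comps with
  | nil => simp [pvPrefixes, pvJ]
  | cons v vs =>
      simp only [pvPrefixes, List.map_cons, pvJ, List.nil_append]
      rw [pv_map_join_prefixes _ _ (by simp), PySem.Chars.join_singleton]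

theorem pv_J_split1 (cs : List Char) (cur : List Char) :
    pvJ cur (pvSplit1 cs) = (pvE cs).map (fun t => cur ++ t) := by
  induction cs generalizing cur with
  | nil => simp [pvSplit1, pvE, pvJ]
  | cons c rest ih =>
      by_cases hc : c = '.'
      · subst hc
        rw [show pvSplit1 ('.' :: rest) = [] :: pvSplit1 rest from rfl,
            show pvE ('.' :: rest) = [] :: (pvE rest).map (fun t => '.' :: t) from rfl]
        simp only [pvJ, List.map_cons, List.append_nil, List.map_map]
        rw [ih]
        simp [Function.comp]
      · rcases hs : pvSplit1 rest with _ | ⟨h, t⟩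
        · exact absurd hs (pvSplit1_ne_nil rest)
        · rw [show pvSplit1 (c :: rest) = (match pvSplit1 rest with
                  | [] => [[c]] | h :: t => (c :: h) :: t) from by simp [pvSplit1, hc],
              show pvE (c :: rest) = (pvE rest).map (fun t => c :: t) from by simp [pvE, hc]]
          rw [hs]
          have := ih (cur ++ [c])
          rw [hs] at this
          simp only [pvJ] at this ⊢
          simp only [List.append_assoc, List.cons_append, List.nil_append] at this ⊢
          rw [this]
          simp [Function.comp]

theorem pv_scan_append (cs full : List Char) (i : Nat) (acc acc' : List String) :
    pvScanDots full cs i (acc ++ acc') = acc ++ pvScanDots full cs i acc' := by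
  induction cs generalizing i acc' with
  | nil => simp [pvScanDots]
  | cons c rest ih =>
      simp only [pvScanDots]
      by_cases hc : c = '.'
      · simp only [if_pos hc, List.append_assoc]
        exact ih _ _
      · simp only [if_neg hc]
        exact ih _ _

theorem pv_scan_spec (l pre : List Char) :
    pvScanDots (pre ++ l) l pre.length [] ++ [String.ofList (pre ++ l)] =
      (pvE l).map (fun t => String.ofList (pre ++ t)) := by
  induction l generalizing pre with
  | nil => simp [pvScanDots, pvE]
  | cons c rest ih =>
      simp only [pvScanDots]
      have htake : (pre ++ c :: rest).take pre.length = pre := by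
        simp
      by_cases hc : c = '.'
      · subst hc
        rw [if_pos rfl, htake, List.nil_append,
            show ([String.ofList pre] : List String) = [String.ofList pre] ++ [] from by simp,
            pv_scan_append]
        have h2 : pre ++ '.' :: rest = (pre ++ ['.']) ++ rest := by simp
        have h3 : pre.length + 1 = (pre ++ ['.']).length := by simp
        rw [List.singleton_append, List.cons_append, h2, h3, ih (pre ++ ['.'])]
        rw [show pvE ('.' :: rest) = [] :: (pvE rest).map (fun t => '.' :: t) from rfl]
        simp [List.map_map, Function.comp]
      · rw [if_neg hc]
        have h2 : pre ++ c :: rest = (pre ++ [c]) ++ rest := by simp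
        have h3 : pre.length + 1 = (pre ++ [c]).length := by simp
        rw [h2, h3, ih (pre ++ [c]),
            show pvE (c :: rest) = (pvE rest).map (fun t => c :: t) from by simp [pvE, hc]]
        simp [List.map_map, Function.comp]

theorem pv_ext (v : String) :
    (((((PySem.Str.split? v ".").getD []).foldl
        (fun (st : List (List String) × List String) w => (st.1 ++ [st.2 ++ [w]], st.2 ++ [w]))
        ([([] : List String)], [])).1.filter (fun vc => decide (0 < vc.length))).map
        (fun vc => PySem.Str.join "." vc)) = (pvE v.toList).map (fun t => String.ofList t) := by
  have hsplit : (PySem.Str.split? v ".").getD [] = (pvSplit1 v.toList).map String.ofList := by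
    simp [PySem.Str.split?, PySem.Chars.split?, pv_splitOn_eq]
  rw [hsplit, pv_fold_spec]
  have hpre : pvPrefixes ([] : List String) ((pvSplit1 v.toList).map String.ofList) =
      (pvPrefixes ([] : List (List Char)) (pvSplit1 v.toList)).map (List.map String.ofList) := by
    simpa using pv_prefixes_map String.ofList (pvSplit1 v.toList) []
  have hfil : (([([] : List String)] ++
      pvPrefixes ([] : List String) ((pvSplit1 v.toList).map String.ofList)).filter
        (fun vc => decide (0 < vc.length))) =
      pvPrefixes ([] : List String) ((pvSplit1 v.toList).map String.ofList) := by
    rw [List.filter_append]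
    have h1 : (([([] : List String)]).filter (fun vc => decide (0 < vc.length))) = [] := by simp
    rw [h1, List.nil_append, List.filter_eq_self]
    intro x hx
    have := pv_prefixes_ne_nil ((pvSplit1 v.toList).map String.ofList) [] x hx
    simpa [List.length_pos_iff] using this
  rw [hfil, hpre, List.map_map]
  have hjoin : ∀ p : List (List Char),
      PySem.Str.join "." (p.map String.ofList) = String.ofList (PySem.Chars.join ['.'] p) := by
    intro p
    simp [PySem.Str.join, List.map_map, Function.comp_def]
  calc (pvPrefixes ([] : List (List Char)) (pvSplit1 v.toList)).map
          ((fun vc => PySem.Str.join "." vc) ∘ List.map String.ofList)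
      = (pvPrefixes ([] : List (List Char)) (pvSplit1 v.toList)).map
          (fun p => String.ofList (PySem.Chars.join ['.'] p)) := by
        apply List.map_congr_left; intro p _; exact hjoin p
    _ = ((pvPrefixes ([] : List (List Char)) (pvSplit1 v.toList)).map
          (PySem.Chars.join ['.'])).map String.ofList := by
        rw [List.map_map]; rfl
    _ = (pvJ [] (pvSplit1 v.toList)).map String.ofList := by rw [pv_map_join_prefixes_nil]
    _ = (pvE v.toList).map (fun t => String.ofList t) := by
        rw [pv_J_split1]; simp

theorem pv_scan_top (v : String) :
    pvScanDots v.toList v.toList 0 ["latest"] ++ [v] =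
      "latest" :: (pvE v.toList).map (fun t => String.ofList t) := by
  have h0 : pvScanDots v.toList v.toList 0 ["latest"] =
      ["latest"] ++ pvScanDots v.toList v.toList 0 [] := by
    simpa using pv_scan_append v.toList v.toList 0 ["latest"] []
  rw [h0, List.append_assoc]
  have := pv_scan_spec v.toList []
  simp only [List.nil_append, List.length_nil] at this
  have hv : String.ofList v.toList = v := by simp
  rw [hv] at this
  rw [this]
  simp

theorem pv_main (ref : String) : calculate_tags ref = calculate_tags_alt ref := by
  unfold calculate_tags calculate_tags_alt
  by_cases hguard : PySem.Str.startswith ref "refs/tags/" = true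
  · simp only [hguard, if_true]
    rw [pv_ext, pv_scan_top]
    simp
  · simp only [if_neg hguard]

-- ===== VERDICT (by name: the statement is the Claim_ definition above) =====
theorem calculate_tags_spec : Claim_equal_calculate_tags := by
  intro ref _
  exact pv_main ref
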